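-- pv_equiv track=rewrite | github.com/AIMPED/plotly_dash | plotlyDash_patternMatching_subIndex.py | create_lookup
-- ===== SOURCE A (Python) =====
-- def create_lookup(major: int, minor: int) -> dict:
--     """
--     function creates a dictionary where the keys are a combination
--     of major and minor indices and values are integers (sequential)
--
--     Parameters:
--         major: range of major indices
--         minor: range of minor indices
--
--     Returns:
--         dictionary
--     """
--     look_up = {}
--     count = 0
--     for mjr in range(major):
--         for mir in range(minor):
--             key = f'{mjr}-{mir}'
--             look_up[key] = count
--             count += 1
--     return look_up
-- ===== SOURCE B (Python) =====
-- def create_lookup(major: int, minor: int) -> dict: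
--     if major <= 0 or minor <= 0:
--         return {}
--     return {f'{i // minor}-{i % minor}': i for i in range(major * minor)}
-- ===== Notes on version B (the rewrite author's own statement) =====
-- stated objective: simpler
-- what changed: Replaces the nested double loop with a running counter by a single flat pass over range(major*minor) that decodes each index arithmetically (i//minor, i%minor) in a dict comprehension.
import Mathlib
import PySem

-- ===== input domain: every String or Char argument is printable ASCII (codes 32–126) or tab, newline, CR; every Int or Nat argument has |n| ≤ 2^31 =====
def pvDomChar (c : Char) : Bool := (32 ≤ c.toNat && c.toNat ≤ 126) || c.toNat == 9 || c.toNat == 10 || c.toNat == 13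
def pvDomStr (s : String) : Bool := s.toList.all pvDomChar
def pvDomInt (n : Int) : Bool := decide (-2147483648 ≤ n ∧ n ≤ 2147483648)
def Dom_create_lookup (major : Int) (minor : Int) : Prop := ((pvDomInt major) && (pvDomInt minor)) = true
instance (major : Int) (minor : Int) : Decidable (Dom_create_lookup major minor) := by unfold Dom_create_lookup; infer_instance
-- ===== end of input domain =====

-- B replaces A's nested loops + running counter by one flat pass over range(major*minor)
-- with arithmetic index decoding (i // minor, i % minor); objective: simpler.

-- ===== PORT A =====
def create_lookup (major : Int) (minor : Int) : List (String × Int) :=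
  let res := (PySem.List.pyRange 0 major 1).foldl
    (fun (st : PySem.Dict String Int × Int) mjr =>
      (PySem.List.pyRange 0 minor 1).foldl
        (fun st mir =>
          (st.1.insert (PySem.Int.toStr mjr ++ "-" ++ PySem.Int.toStr mir) st.2, st.2 + 1))
        st)
    (PySem.Dict.empty, 0)
  res.1.items

-- ===== PORT B =====
def create_lookup_alt (major : Int) (minor : Int) : List (String × Int) :=
  if major ≤ 0 ∨ minor ≤ 0 then []
  else
    ((PySem.List.pyRange 0 (major * minor) 1).foldl
      (fun (d : PySem.Dict String Int) i =>
        d.insert (PySem.Int.toStr (PySem.Int.floordiv i minor) ++ "-" ++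
                  PySem.Int.toStr (PySem.Int.mod i minor)) i)
      PySem.Dict.empty).items

-- ===== PRECONDITION & SPEC =====
def Spec_create_lookup (major : Int) (minor : Int) (out : List (String × Int)) : Prop := out = create_lookup_alt major minor
instance (major : Int) (minor : Int) (out : List (String × Int)) : Decidable (Spec_create_lookup major minor out) := by unfold Spec_create_lookup; infer_instance

-- ===== CLAIM (what is proved, stated in full; the proofs are below) =====
def Claim_equal_create_lookup : Prop := ∀ (major : Int) (minor : Int), Dom_create_lookup major minor → Spec_create_lookup major minor (create_lookup major minor)

-- ===== LEMMAS AND PROOFS =====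

-- the key string f'{a}-{b}'
def clKey (a b : Int) : String := PySem.Int.toStr a ++ "-" ++ PySem.Int.toStr b

-- insert a (key, value) pair
def clIns (d : PySem.Dict String Int) (p : String × Int) : PySem.Dict String Int := d.insert p.1 p.2

-- the pair sequence A's nested loops insert
def clListA (m k : Nat) : List (String × Int) :=
  (List.range m).flatMap
    (fun (a : Nat) => (List.range k).map
      (fun (b : Nat) => (clKey (a : Int) (b : Int), ((a * k + b : Nat) : Int))))

-- the pair sequence B's flat loop inserts
def clListB (m k : Nat) : List (String × Int) :=
  (List.range (m * k)).map
    (fun (i : Nat) => (clKey ((i / k : Nat) : Int) ((i % k : Nat) : Int), (i : Int)))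

lemma clListA_eq_clListB (m k : Nat) (hk : 0 < k) : clListA m k = clListB m k := by
  induction m with
  | zero => simp [clListA, clListB]
  | succ m ih =>
    have h1 : clListA (m + 1) k
        = clListA m k ++ (List.range k).map
            (fun (b : Nat) => (clKey (m : Int) (b : Int), ((m * k + b : Nat) : Int))) := by
      simp [clListA, List.range_succ]
    have h2 : clListB (m + 1) k
        = clListB m k ++ (List.range k).map
            (fun (b : Nat) =>
              (clKey (((m * k + b) / k : Nat) : Int) (((m * k + b) % k : Nat) : Int),
               ((m * k + b : Nat) : Int))) := by
      simp [clListB, Nat.succ_mul, List.range_add, List.map_map, Function.comp]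
    rw [h1, h2, ih]
    congr 1
    apply List.map_congr_left
    intro b hb
    have hbk : b < k := List.mem_range.mp hb
    have hd : (m * k + b) / k = m := by
      rw [Nat.mul_comm, Nat.mul_add_div hk, Nat.div_eq_of_lt hbk]
      omega
    have hm : (m * k + b) % k = b := by
      rw [Nat.mul_comm, Nat.mul_add_mod, Nat.mod_eq_of_lt hbk]
    rw [hd, hm]

-- inner loop of A: range(minor) with fixed mjr, threading the (dict, count) state
lemma clInnerA (mjr : Int) (k c0 : Nat) (d : PySem.Dict String Int) :
    ((List.range k).map (fun (b : Nat) => (b : Int))).foldl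
      (fun st mir => (st.1.insert (PySem.Int.toStr mjr ++ "-" ++ PySem.Int.toStr mir) st.2, st.2 + 1))
      (d, ((c0 : Nat) : Int))
    = (((List.range k).map
          (fun (b : Nat) => (clKey mjr (b : Int), ((c0 + b : Nat) : Int)))).foldl clIns d,
       ((c0 + k : Nat) : Int)) := by
  induction k with
  | zero => simp
  | succ k ih =>
    rw [List.range_succ, List.map_append, List.foldl_append, ih,
        List.map_append, List.foldl_append]
    simp only [List.map_cons, List.map_nil, List.foldl_cons, List.foldl_nil]
    refine Prod.ext ?_ ?_
    · rfl
    · push_cast; ring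

-- outer loop of A from the initial state
lemma clOuterA (m k : Nat) :
    ((List.range m).map (fun (a : Nat) => (a : Int))).foldl
      (fun (st : PySem.Dict String Int × Int) mjr =>
        ((List.range k).map (fun (b : Nat) => (b : Int))).foldl
          (fun st mir => (st.1.insert (PySem.Int.toStr mjr ++ "-" ++ PySem.Int.toStr mir) st.2, st.2 + 1))
          st)
      (PySem.Dict.empty, 0)
    = ((clListA m k).foldl clIns PySem.Dict.empty, ((m * k : Nat) : Int)) := by
  induction m with
  | zero => simp [clListA]
  | succ m ih =>
    rw [List.range_succ, List.map_append, List.foldl_append, ih]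
    simp only [List.map_cons, List.map_nil, List.foldl_cons, List.foldl_nil]
    rw [clInnerA (m : Int) k (m * k) _]
    have hA : clListA (m + 1) k
        = clListA m k ++ (List.range k).map
            (fun (b : Nat) => (clKey (m : Int) (b : Int), ((m * k + b : Nat) : Int))) := by
      simp [clListA, List.range_succ]
    rw [hA, List.foldl_append]
    refine Prod.ext ?_ ?_
    · rfl
    · push_cast; ring

-- the constant-state outer fold (minor ≤ 0: the inner loop is empty)
lemma clFoldlConst (l : List Int) (init : PySem.Dict String Int × Int) :
    l.foldl (fun st _ => st) init = init := by
  induction l generalizing init with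
  | nil => rfl
  | cons x xs ih => exact ih init

-- B's flat fold produces exactly the clListB insert sequence
lemma clFlatB (m k : Nat) :
    ((List.range (m * k)).map (fun (i : Nat) => (i : Int))).foldl
      (fun (d : PySem.Dict String Int) i =>
        d.insert (PySem.Int.toStr (PySem.Int.floordiv i (k : Int)) ++ "-" ++
                  PySem.Int.toStr (PySem.Int.mod i (k : Int))) i)
      PySem.Dict.empty
    = (clListB m k).foldl clIns PySem.Dict.empty := by
  rw [List.foldl_map, clListB, List.foldl_map]
  apply PySem.List.foldl_congr_mem
  intro d i _
  simp [clIns, clKey, PySem.Int.floordiv_natCast, PySem.Int.mod_natCast]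

-- ===== VERDICT (by name: the statement is the Claim_ definition above) =====
theorem create_lookup_spec : Claim_equal_create_lookup := by
  intro major minor _
  unfold Spec_create_lookup create_lookup create_lookup_alt
  by_cases h : major ≤ 0 ∨ minor ≤ 0
  · rw [if_pos h]
    rcases h with hmaj | hmin
    · have hout : PySem.List.pyRange 0 major 1 = [] := by
        rw [PySem.List.pyRange_one]
        rw [Int.toNat_of_nonpos (by omega : major - 0 ≤ 0)]
        simp
      simp only [hout, List.foldl_nil]
      rfl
    · have hin : PySem.List.pyRange 0 minor 1 = [] := by
        rw [PySem.List.pyRange_one]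
        rw [Int.toNat_of_nonpos (by omega : minor - 0 ≤ 0)]
        simp
      simp only [hin, List.foldl_nil]
      rw [clFoldlConst]
      rfl
  · rw [if_neg h]
    push Not at h
    obtain ⟨hmaj, hmin⟩ := h
    obtain ⟨m, hm⟩ : ∃ m : Nat, major = (m : Int) := ⟨major.toNat, (Int.toNat_of_nonneg hmaj.le).symm⟩
    obtain ⟨k, hk⟩ : ∃ k : Nat, minor = (k : Int) := ⟨minor.toNat, (Int.toNat_of_nonneg hmin.le).symm⟩
    subst hm hk
    have hkpos : 0 < k := by exact_mod_cast hmin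
    have hmk : (m : Int) * (k : Int) = ((m * k : Nat) : Int) := by push_cast; ring
    rw [hmk, PySem.List.pyRange_zero_natCast, PySem.List.pyRange_zero_natCast,
        PySem.List.pyRange_zero_natCast]
    rw [clOuterA, clFlatB m k, clListA_eq_clListB m k hkpos]
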